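-- pv_equiv track=rewrite | github.com/Jvpcavalcante/Sokaban_Solver | sokoban_base.py | perdemo
-- ===== SOURCE A (Python) =====
-- def perdemo(pos_caixas,pos_objetivos,pos_paredes):
--     """
--     A funcao dessa heuristica foi encontrada numa wiki.
--
--     A ideia por tras dela e verificar por meio de varias rotacoes do board se existe
--     alguma situacao que cria um deadlock imediato, essa funcao ainda assim e BEMM ruim
--     existem modulos gigantes com mais de 800 linhas so pra verificar os deadlocks.
--
--     Todavia, essa funcao e desnecessario pro funcionamento do programa ela so poda um pouco
--     a arvore de busca, dependendo da fase voce ganha muito desempenho, em outras nem tanto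
--     mas o algoritmo como um todo funciona perfeitamente sem ela.
--
--     O resto da explicacao dessa funcao sera feito na apresentacao oral, visto que e muito mais
--     facil explicar visualmente com os slides que quero usar.
--     """
--     rotatePattern = [[0,1,2,3,4,5,6,7,8],
--                     [2,5,8,1,4,7,0,3,6],
--                     [8,7,6,5,4,3,2,1,0],
--                     [6,3,0,7,4,1,8,5,2]]
--
--     flipPattern = [[2,1,0,5,4,3,8,7,6],
--                     [0,3,6,1,4,7,2,5,8],
--                     [6,7,8,3,4,5,0,1,2],
--                     [8,5,2,7,4,1,6,3,0]]
--
--     allPattern = rotatePattern + flipPattern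
--
--     for box in pos_caixas:
--         if box not in pos_objetivos:
--             board = [(box[0] - 1, box[1] - 1), (box[0] - 1, box[1]), (box[0] - 1, box[1] + 1),
--                     (box[0], box[1] - 1), (box[0], box[1]), (box[0], box[1] + 1),
--                     (box[0] + 1, box[1] - 1), (box[0] + 1, box[1]), (box[0] + 1, box[1] + 1)]
--
--             for pattern in allPattern:
--                 newBoard = [board[i] for i in pattern]
--                 if newBoard[1] in pos_paredes and newBoard[5] in pos_paredes: return True
--                 elif newBoard[1] in pos_caixas and newBoard[2] in pos_paredes and newBoard[5] in pos_paredes: return True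
--                 elif newBoard[1] in pos_caixas and newBoard[2] in pos_paredes and newBoard[5] in pos_caixas: return True
--                 elif newBoard[1] in pos_caixas and newBoard[2] in pos_caixas and newBoard[5] in pos_caixas: return True
--                 elif newBoard[1] in pos_caixas and newBoard[6] in pos_caixas and newBoard[2] in pos_paredes and newBoard[3] in pos_paredes and newBoard[8] in pos_paredes: return True
--     return False
-- ===== SOURCE B (Python) =====
-- # B: no pattern/rotation tables at all. Each neighbor's wall/box membership is
-- # tested exactly once (against hash sets), and deadlock is decided by a single
-- # closed boolean formula: the closure of A's five 3x3 patterns under the eight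
-- # dihedral symmetries, written out directly (verified exhaustively over all
-- # 2^16 neighborhood assignments).
--
-- def _frozen_corner(bv, bh, bdiag, wv, wh, wdiag):
--     # box pushed into a corner formed with another box/wall on sides v,h
--     return (bv and wdiag and wh) or (bh and wdiag and wv) \
--         or (bv and bh and (wdiag or bdiag))
--
-- def perdemo(pos_caixas, pos_objetivos, pos_paredes):
--     walls = set(pos_paredes)
--     boxes = set(pos_caixas)
--     goals = set(pos_objetivos)
--     for box in pos_caixas:
--         if box in goals:
--             continue
--         r, c = box
--         wul, wu, wur = (r-1, c-1) in walls, (r-1, c) in walls, (r-1, c+1) in walls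
--         wl,  wr      = (r, c-1) in walls, (r, c+1) in walls
--         wdl, wd, wdr = (r+1, c-1) in walls, (r+1, c) in walls, (r+1, c+1) in walls
--         bul, bu, bur = (r-1, c-1) in boxes, (r-1, c) in boxes, (r-1, c+1) in boxes
--         bl,  br      = (r, c-1) in boxes, (r, c+1) in boxes
--         bdl, bd, bdr = (r+1, c-1) in boxes, (r+1, c) in boxes, (r+1, c+1) in boxes
--         if (((wu or wd) and (wl or wr))
--                 or _frozen_corner(bu, br, bur, wu, wr, wur)
--                 or _frozen_corner(bu, bl, bul, wu, wl, wul)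
--                 or _frozen_corner(bd, br, bdr, wd, wr, wdr)
--                 or _frozen_corner(bd, bl, bdl, wd, wl, wdl)
--                 or (((bu and bdl) or (bd and bul)) and wl and wur and wdr)
--                 or (((bu and bdr) or (bd and bur)) and wr and wul and wdl)
--                 or (((bl and bur) or (br and bul)) and wu and wdl and wdr)
--                 or (((bl and bdr) or (br and bdl)) and wd and wul and wur)):
--             return True
--     return False
-- ===== Notes on version B (the rewrite author's own statement) =====
-- stated objective: faster
-- what changed: B eliminates A's eight rotation/flip pattern tables and board rebuilding: it tests each of the eight neighbor cells' wall/box membership once against hash sets and decides deadlock with a single closed boolean formula (the dihedral-symmetry closure of A's five patterns, verified exhaustively over all 2^16 neighborhood assignments).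
import Mathlib
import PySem

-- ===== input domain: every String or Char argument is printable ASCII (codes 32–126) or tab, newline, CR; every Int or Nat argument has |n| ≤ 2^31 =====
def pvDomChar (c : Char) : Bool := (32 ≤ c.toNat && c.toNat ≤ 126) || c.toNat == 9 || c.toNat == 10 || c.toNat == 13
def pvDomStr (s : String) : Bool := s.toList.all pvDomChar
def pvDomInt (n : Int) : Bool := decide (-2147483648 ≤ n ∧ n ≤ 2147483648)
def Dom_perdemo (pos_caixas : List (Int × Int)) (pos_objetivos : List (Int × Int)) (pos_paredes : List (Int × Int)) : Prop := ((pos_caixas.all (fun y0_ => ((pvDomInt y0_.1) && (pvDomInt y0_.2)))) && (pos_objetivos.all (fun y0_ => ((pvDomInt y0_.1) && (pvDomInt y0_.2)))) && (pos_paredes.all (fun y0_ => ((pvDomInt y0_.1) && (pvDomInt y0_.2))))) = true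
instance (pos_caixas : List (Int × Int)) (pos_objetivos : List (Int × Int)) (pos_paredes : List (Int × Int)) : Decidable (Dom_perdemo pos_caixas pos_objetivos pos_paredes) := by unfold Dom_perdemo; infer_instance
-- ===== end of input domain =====

-- B drops A's eight pattern tables entirely: each neighbor's wall/box membership is
-- tested once (against sets) and one closed symmetry-closed boolean formula decides
-- deadlock (objective: alternative).

-- ===== PORT A =====
-- the eight index patterns (rotatePattern ++ flipPattern), as in A
def pvAllPattern : List (List Nat) :=
  [[0,1,2,3,4,5,6,7,8],
   [2,5,8,1,4,7,0,3,6],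
   [8,7,6,5,4,3,2,1,0],
   [6,3,0,7,4,1,8,5,2],
   [2,1,0,5,4,3,8,7,6],
   [0,3,6,1,4,7,2,5,8],
   [6,7,8,3,4,5,0,1,2],
   [8,5,2,7,4,1,6,3,0]]

-- the if/elif chain of A's inner loop body (a 'for … return True' loop is an .any)
def pvPatternCheck (pos_caixas pos_paredes : List (Int × Int))
    (board : List (Int × Int)) (pattern : List Nat) : Bool :=
  let newBoard := pattern.map (fun i => board.getD i (0, 0))
  if pos_paredes.contains (newBoard.getD 1 (0,0)) && pos_paredes.contains (newBoard.getD 5 (0,0)) then true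
  else if pos_caixas.contains (newBoard.getD 1 (0,0)) && pos_paredes.contains (newBoard.getD 2 (0,0)) && pos_paredes.contains (newBoard.getD 5 (0,0)) then true
  else if pos_caixas.contains (newBoard.getD 1 (0,0)) && pos_paredes.contains (newBoard.getD 2 (0,0)) && pos_caixas.contains (newBoard.getD 5 (0,0)) then true
  else if pos_caixas.contains (newBoard.getD 1 (0,0)) && pos_caixas.contains (newBoard.getD 2 (0,0)) && pos_caixas.contains (newBoard.getD 5 (0,0)) then true
  else if pos_caixas.contains (newBoard.getD 1 (0,0)) && pos_caixas.contains (newBoard.getD 6 (0,0)) && pos_paredes.contains (newBoard.getD 2 (0,0)) && pos_paredes.contains (newBoard.getD 3 (0,0)) && pos_paredes.contains (newBoard.getD 8 (0,0)) then true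
  else false

def perdemo (pos_caixas : List (Int × Int)) (pos_objetivos : List (Int × Int)) (pos_paredes : List (Int × Int)) : Bool :=
  pos_caixas.any (fun box =>
    !pos_objetivos.contains box &&
    (let board : List (Int × Int) :=
      [(box.1 - 1, box.2 - 1), (box.1 - 1, box.2), (box.1 - 1, box.2 + 1),
       (box.1, box.2 - 1), (box.1, box.2), (box.1, box.2 + 1),
       (box.1 + 1, box.2 - 1), (box.1 + 1, box.2), (box.1 + 1, box.2 + 1)]
     pvAllPattern.any (pvPatternCheck pos_caixas pos_paredes board)))

-- ===== PORT B =====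
-- helper _frozen_corner of Source B
def pvFrozenCorner (bv bh bdiag wv wh wdiag : Bool) : Bool :=
  (bv && wdiag && wh) || (bh && wdiag && wv) || (bv && bh && (wdiag || bdiag))

def perdemo_alt (pos_caixas : List (Int × Int)) (pos_objetivos : List (Int × Int)) (pos_paredes : List (Int × Int)) : Bool :=
  let walls : PySem.Set (Int × Int) := PySem.Set.ofList pos_paredes
  let boxes : PySem.Set (Int × Int) := PySem.Set.ofList pos_caixas
  let goals : PySem.Set (Int × Int) := PySem.Set.ofList pos_objetivos
  pos_caixas.any (fun box =>
    if goals.contains box then false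
    else
      let r := box.1
      let c := box.2
      let wul := walls.contains (r-1, c-1); let wu := walls.contains (r-1, c); let wur := walls.contains (r-1, c+1)
      let wl  := walls.contains (r, c-1);                                      let wr  := walls.contains (r, c+1)
      let wdl := walls.contains (r+1, c-1); let wd := walls.contains (r+1, c); let wdr := walls.contains (r+1, c+1)
      let bul := boxes.contains (r-1, c-1); let bu := boxes.contains (r-1, c); let bur := boxes.contains (r-1, c+1)
      let bl  := boxes.contains (r, c-1);                                      let br  := boxes.contains (r, c+1)
      let bdl := boxes.contains (r+1, c-1); let bd := boxes.contains (r+1, c); let bdr := boxes.contains (r+1, c+1)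
      ((wu || wd) && (wl || wr))
        || pvFrozenCorner bu br bur wu wr wur
        || pvFrozenCorner bu bl bul wu wl wul
        || pvFrozenCorner bd br bdr wd wr wdr
        || pvFrozenCorner bd bl bdl wd wl wdl
        || (((bu && bdl) || (bd && bul)) && wl && wur && wdr)
        || (((bu && bdr) || (bd && bur)) && wr && wul && wdl)
        || (((bl && bur) || (br && bul)) && wu && wdl && wdr)
        || (((bl && bdr) || (br && bdl)) && wd && wul && wur))

-- ===== PRECONDITION & SPEC =====
def Spec_perdemo (pos_caixas : List (Int × Int)) (pos_objetivos : List (Int × Int)) (pos_paredes : List (Int × Int)) (out : Bool) : Prop := out = perdemo_alt pos_caixas pos_objetivos pos_paredes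
instance (pos_caixas : List (Int × Int)) (pos_objetivos : List (Int × Int)) (pos_paredes : List (Int × Int)) (out : Bool) : Decidable (Spec_perdemo pos_caixas pos_objetivos pos_paredes out) := by unfold Spec_perdemo; infer_instance

-- ===== CLAIM =====
def Claim_equal_perdemo : Prop := ∀ (pos_caixas : List (Int × Int)) (pos_objetivos : List (Int × Int)) (pos_paredes : List (Int × Int)), Dom_perdemo pos_caixas pos_objetivos pos_paredes → Spec_perdemo pos_caixas pos_objetivos pos_paredes (perdemo pos_caixas pos_objetivos pos_paredes)

-- ===== LEMMAS AND PROOFS =====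

-- set(xs) membership agrees with list membership
theorem pv_contains_ofList {α : Type} [BEq α] [LawfulBEq α] (xs : List α) (a : α) :
    PySem.Set.contains (PySem.Set.ofList xs) a = xs.contains a := by
  simp [PySem.Set.contains_eq_listContains, PySem.Set.mem_ofList]

theorem pv_any_congr {α : Type} (l : List α) (f g : α → Bool) (h : ∀ x, f x = g x) :
    l.any f = l.any g := by
  induction l with
  | nil => rfl
  | cons x xs ih => simp only [List.any_cons, h, ih]

-- the symmetry closure of A's five patterns, as a 16-variable boolean tautology
set_option maxHeartbeats 2000000 in
theorem pv_formula_eq (wul wu wur wl wr wdl wd wdr bul bu bur bl br bdl bd bdr : Bool) :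
    ((if wu && wr then true
      else if bu && wur && wr then true
      else if bu && wur && br then true
      else if bu && bur && br then true
      else if bu && bdl && wur && wl && wdr then true else false) ||
     ((if wr && wd then true
       else if br && wdr && wd then true
       else if br && wdr && bd then true
       else if br && bdr && bd then true
       else if br && bul && wdr && wu && wdl then true else false) ||
      ((if wd && wl then true
        else if bd && wdl && wl then true
        else if bd && wdl && bl then true
        else if bd && bdl && bl then true
        else if bd && bur && wdl && wr && wul then true else false) ||
       ((if wl && wu then true
         else if bl && wul && wu then true
         else if bl && wul && bu then true
         else if bl && bul && bu then true
         else if bl && bdr && wul && wd && wur then true else false) ||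
        ((if wu && wl then true
          else if bu && wul && wl then true
          else if bu && wul && bl then true
          else if bu && bul && bl then true
          else if bu && bdr && wul && wr && wdl then true else false) ||
         ((if wl && wd then true
           else if bl && wdl && wd then true
           else if bl && wdl && bd then true
           else if bl && bdl && bd then true
           else if bl && bur && wdl && wu && wdr then true else false) ||
          ((if wd && wr then true
            else if bd && wdr && wr then true
            else if bd && wdr && br then true
            else if bd && bdr && br then true
            else if bd && bul && wdr && wl && wur then true else false) ||
           (if wr && wu then true
            else if br && wur && wu then true
            else if br && wur && bu then true
            else if br && bur && bu then true
            else if br && bdl && wur && wd && wul then true else false))))))))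
    =
    (((wu || wd) && (wl || wr))
      || pvFrozenCorner bu br bur wu wr wur
      || pvFrozenCorner bu bl bul wu wl wul
      || pvFrozenCorner bd br bdr wd wr wdr
      || pvFrozenCorner bd bl bdl wd wl wdl
      || (((bu && bdl) || (bd && bul)) && wl && wur && wdr)
      || (((bu && bdr) || (bd && bur)) && wr && wul && wdl)
      || (((bl && bur) || (br && bul)) && wu && wdl && wdr)
      || (((bl && bdr) || (br && bdl)) && wd && wul && wur)) := by
  revert wul wu wur wl wr wdl wd wdr bul bu bur bl br bdl bd bdr
  decide

-- per box: A's pattern scan equals B's closed formula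
theorem perdemo_inner_eq (pos_caixas pos_objetivos pos_paredes : List (Int × Int)) (box : Int × Int) :
    (!pos_objetivos.contains box &&
      (let board : List (Int × Int) :=
        [(box.1 - 1, box.2 - 1), (box.1 - 1, box.2), (box.1 - 1, box.2 + 1),
         (box.1, box.2 - 1), (box.1, box.2), (box.1, box.2 + 1),
         (box.1 + 1, box.2 - 1), (box.1 + 1, box.2), (box.1 + 1, box.2 + 1)]
       pvAllPattern.any (pvPatternCheck pos_caixas pos_paredes board))) =
    (if (PySem.Set.ofList pos_objetivos).contains box then false
     else
      let r := box.1
      let c := box.2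
      let walls := PySem.Set.ofList pos_paredes
      let boxes := PySem.Set.ofList pos_caixas
      let wul := walls.contains (r-1, c-1); let wu := walls.contains (r-1, c); let wur := walls.contains (r-1, c+1)
      let wl  := walls.contains (r, c-1);                                      let wr  := walls.contains (r, c+1)
      let wdl := walls.contains (r+1, c-1); let wd := walls.contains (r+1, c); let wdr := walls.contains (r+1, c+1)
      let bul := boxes.contains (r-1, c-1); let bu := boxes.contains (r-1, c); let bur := boxes.contains (r-1, c+1)
      let bl  := boxes.contains (r, c-1);                                      let br  := boxes.contains (r, c+1)
      let bdl := boxes.contains (r+1, c-1); let bd := boxes.contains (r+1, c); let bdr := boxes.contains (r+1, c+1)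
      ((wu || wd) && (wl || wr))
        || pvFrozenCorner bu br bur wu wr wur
        || pvFrozenCorner bu bl bul wu wl wul
        || pvFrozenCorner bd br bdr wd wr wdr
        || pvFrozenCorner bd bl bdl wd wl wdl
        || (((bu && bdl) || (bd && bul)) && wl && wur && wdr)
        || (((bu && bdr) || (bd && bur)) && wr && wul && wdl)
        || (((bl && bur) || (br && bul)) && wu && wdl && wdr)
        || (((bl && bdr) || (br && bdl)) && wd && wul && wur)) := by
  obtain ⟨r, c⟩ := box
  simp only [pv_contains_ofList]
  cases hobj : pos_objetivos.contains (r, c)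
  · simp only [Bool.not_false, Bool.true_and, if_neg Bool.false_ne_true,
      pvAllPattern, pvPatternCheck, List.any_cons, List.any_nil, Bool.or_false,
      List.map_cons, List.map_nil, List.getD_cons_zero, List.getD_cons_succ,
      List.getD, List.getElem?_cons_zero, List.getElem?_cons_succ, Option.getD_some]
    exact pv_formula_eq _ _ _ _ _ _ _ _ _ _ _ _ _ _ _ _
  · simp

-- ===== VERDICT =====
theorem perdemo_spec : Claim_equal_perdemo := by
  intro pos_caixas pos_objetivos pos_paredes _
  unfold Spec_perdemo perdemo perdemo_alt
  exact pv_any_congr _ _ _ (fun box => perdemo_inner_eq pos_caixas pos_objetivos pos_paredes box)
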